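-- pv_equiv track=rewrite | github.com/abkunal/Data-Structures-and-Algorithms | python/recursion/recursion.py | forward_diagonal
-- ===== SOURCE A (Python) =====
-- def forward_diagonal(board, x, y):
--     """ Looks for all the forward diagonal entries """
--     i,j = (x-1,y-1)
--
--     while i >= 0 and j >= 0:
--         if board[i][j] != 0:
--             return False
--         i -= 1
--         j -= 1
--
--     i,j = (x+1,y+1)
--     l = len(board)
--     while i < l and j < l:
--         if board[i][j] != 0:
--             return False
--         i += 1
--         j += 1
--
--     return True
-- ===== SOURCE B (Python) =====
-- def forward_diagonal(board, x, y):
--     """ Looks for all the forward diagonal entries """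
--     n = len(board)
--     d = x - y
--     return all(i == x or not (0 <= i - d < n) or board[i][i - d] == 0
--                for i in range(n))
-- ===== Notes on version B (the rewrite author's own statement) =====
-- stated objective: simpler
-- what changed: Replaces the two outward-walking while-loops with a single all() over row indices, computing each diagonal column from the invariant i - j == x - y and skipping the centre row i == x.
-- outside the precondition, e.g. on forward_diagonal([[0, 0], [7, 0]], -3, -2): A returns False, B returns True; on forward_diagonal([[0, 0, 0, 9]], 1, 4): A returns False, B returns True
import Mathlib
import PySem

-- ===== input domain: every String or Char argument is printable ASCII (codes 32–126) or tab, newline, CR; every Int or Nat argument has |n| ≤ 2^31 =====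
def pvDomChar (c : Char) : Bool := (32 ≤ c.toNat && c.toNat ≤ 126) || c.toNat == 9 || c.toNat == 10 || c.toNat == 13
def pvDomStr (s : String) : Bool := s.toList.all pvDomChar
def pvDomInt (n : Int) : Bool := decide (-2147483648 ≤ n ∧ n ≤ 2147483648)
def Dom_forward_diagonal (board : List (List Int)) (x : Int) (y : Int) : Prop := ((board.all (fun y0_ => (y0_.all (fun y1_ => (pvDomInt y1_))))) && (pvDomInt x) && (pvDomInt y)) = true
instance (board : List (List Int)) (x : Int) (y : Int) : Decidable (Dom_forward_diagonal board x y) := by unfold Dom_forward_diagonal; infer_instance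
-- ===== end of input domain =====

-- B replaces A's two outward-walking while-loops by one all() over row indices using the
-- diagonal invariant i - j == x - y (objective: simpler); equivalence proved on Pre_.

-- shared helper: board[i][j] as a total function (0 where Python raises; negative
-- indices wrap as in Python) — Pre_ restricts the claim to inputs where this is exact
def pyCell (board : List (List Int)) (i j : Int) : Int :=
  (PySem.List.pyGet? ((PySem.List.pyGet? board i).getD []) j).getD 0

-- ===== PORT A =====
-- first while-loop: while i >= 0 and j >= 0: if board[i][j] != 0: return False; i -= 1; j -= 1
def fdUp (board : List (List Int)) (i j : Int) : Bool :=
  if h : 0 ≤ i ∧ 0 ≤ j then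
    if pyCell board i j ≠ 0 then false
    else fdUp board (i - 1) (j - 1)
  else true
termination_by (i + 1).toNat
decreasing_by omega

-- second while-loop: while i < l and j < l: if board[i][j] != 0: return False; i += 1; j += 1
def fdDown (board : List (List Int)) (l i j : Int) : Bool :=
  if h : i < l ∧ j < l then
    if pyCell board i j ≠ 0 then false
    else fdDown board l (i + 1) (j + 1)
  else true
termination_by (l - i).toNat
decreasing_by omega

def forward_diagonal (board : List (List Int)) (x : Int) (y : Int) : Bool :=
  if fdUp board (x - 1) (y - 1) then
    fdDown board (board.length : Int) (x + 1) (y + 1)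
  else false

-- ===== PORT B =====
def forward_diagonal_alt (board : List (List Int)) (x : Int) (y : Int) : Bool :=
  let n : Int := (board.length : Int)
  let d : Int := x - y
  (PySem.List.pyRange 0 n 1).all (fun i =>
    i == x || !(decide (0 ≤ i - d ∧ i - d < n)) || pyCell board i (i - d) == 0)

-- ===== PRECONDITION & SPEC =====
-- length of board[i] (0 for a missing row); used only by Pre_ below
def rowLen (board : List (List Int)) (i : Int) : Int :=
  (((PySem.List.pyGet? board i).getD []).length : Int)

-- Pre_ excludes the inputs on which A raises IndexError before deciding, and those on
-- which A reads — via Python's negative-index wraparound or a row extending past the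
-- board's square — a NONZERO cell outside the square diagonal that the single-scan B
-- examines; on those A returns an accidental value B does not reproduce (see the cites).
-- It admits inputs whose visited cells are all accessible with the out-of-square ones
-- zero, and inputs on which a nonzero in-square diagonal cell is reached safely (both
-- programs then answer False before any further access).
def Pre_forward_diagonal (board : List (List Int)) (x : Int) (y : Int) : Prop :=
  (∀ i ∈ PySem.List.pyRange (max 0 (x - y)) x 1,
      i < (board.length : Int) ∧ i - (x - y) < rowLen board i ∧
      ((board.length : Int) ≤ i - (x - y) → pyCell board i (i - (x - y)) = 0)) ∧
  ((∀ i ∈ PySem.List.pyRange (x + 1) (min (board.length : Int) ((board.length : Int) + (x - y))) 1,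
      -(board.length : Int) ≤ i ∧ -(rowLen board i) ≤ i - (x - y) ∧
      i - (x - y) < rowLen board i ∧
      (¬(0 ≤ i ∧ 0 ≤ i - (x - y)) → pyCell board i (i - (x - y)) = 0)) ∨
   (∃ i ∈ PySem.List.pyRange (max 0 (x - y)) x 1,
      i - (x - y) < (board.length : Int) ∧ pyCell board i (i - (x - y)) ≠ 0) ∨
   (∃ i ∈ PySem.List.pyRange (x + 1) (min (board.length : Int) ((board.length : Int) + (x - y))) 1,
      0 ≤ i ∧ 0 ≤ i - (x - y) ∧ pyCell board i (i - (x - y)) ≠ 0 ∧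
      (∀ i' ∈ PySem.List.pyRange (x + 1) (min (board.length : Int) ((board.length : Int) + (x - y))) 1,
        i' < i → -(board.length : Int) ≤ i' ∧ -(rowLen board i') ≤ i' - (x - y) ∧
        i' - (x - y) < rowLen board i' ∧
        (¬(0 ≤ i' ∧ 0 ≤ i' - (x - y)) → pyCell board i' (i' - (x - y)) = 0))))
instance (board : List (List Int)) (x : Int) (y : Int) : Decidable (Pre_forward_diagonal board x y) := by
  unfold Pre_forward_diagonal; infer_instance

def pvWitness_forward_diagonal : List (List Int) × Int × Int := ([[0, 1], [0, 0]], 0, 1)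

def Spec_forward_diagonal (board : List (List Int)) (x : Int) (y : Int) (out : Bool) : Prop := out = forward_diagonal_alt board x y
instance (board : List (List Int)) (x : Int) (y : Int) (out : Bool) : Decidable (Spec_forward_diagonal board x y out) := by unfold Spec_forward_diagonal; infer_instance

-- ===== CLAIM (what is proved, stated in full; the proofs are below) =====
def Claim_equal_forward_diagonal : Prop := ∀ (board : List (List Int)) (x : Int) (y : Int), Dom_forward_diagonal board x y → Pre_forward_diagonal board x y → Spec_forward_diagonal board x y (forward_diagonal board x y)

-- ===== LEMMAS AND PROOFS =====

lemma fdUp_iff (board : List (List Int)) (i j : Int) :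
    fdUp board i j = true ↔
      ∀ t : Nat, (t : Int) ≤ i → (t : Int) ≤ j → pyCell board (i - t) (j - t) = 0 := by
  induction i, j using fdUp.induct board with
  | case1 i j h hc =>
    rw [fdUp, dif_pos h, if_pos hc]
    refine iff_of_false (by simp) ?_
    intro hall
    exact hc (by simpa using hall 0 (by omega) (by omega))
  | case2 i j h hc ih =>
    rw [fdUp, dif_pos h, if_neg hc]
    rw [not_not] at hc
    rw [ih]
    constructor
    · intro hrec t ht1 ht2
      cases t with
      | zero => simpa using hc
      | succ t' =>
        have := hrec t' (by push_cast at ht1 ⊢; omega) (by push_cast at ht2 ⊢; omega)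
        have e1 : i - 1 - (t' : Int) = i - ((t' + 1 : Nat) : Int) := by push_cast; ring
        have e2 : j - 1 - (t' : Int) = j - ((t' + 1 : Nat) : Int) := by push_cast; ring
        rwa [e1, e2] at this
    · intro hall t' ht1 ht2
      have := hall (t' + 1) (by push_cast; omega) (by push_cast; omega)
      have e1 : i - ((t' + 1 : Nat) : Int) = i - 1 - (t' : Int) := by push_cast; ring
      have e2 : j - ((t' + 1 : Nat) : Int) = j - 1 - (t' : Int) := by push_cast; ring
      rwa [e1, e2] at this
  | case3 i j h =>
    rw [fdUp, dif_neg h]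
    refine iff_of_true rfl ?_
    intro t ht1 ht2
    exfalso; omega

lemma fdDown_iff (board : List (List Int)) (l i j : Int) :
    fdDown board l i j = true ↔
      ∀ t : Nat, i + t < l → j + t < l → pyCell board (i + t) (j + t) = 0 := by
  induction i, j using fdDown.induct board l with
  | case1 i j h hc =>
    rw [fdDown, dif_pos h, if_pos hc]
    refine iff_of_false (by simp) ?_
    intro hall
    exact hc (by simpa using hall 0 (by omega) (by omega))
  | case2 i j h hc ih =>
    rw [fdDown, dif_pos h, if_neg hc]
    rw [not_not] at hc
    rw [ih]
    constructor
    · intro hrec t ht1 ht2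
      cases t with
      | zero => simpa using hc
      | succ t' =>
        have := hrec t' (by push_cast at ht1 ⊢; omega) (by push_cast at ht2 ⊢; omega)
        have e1 : i + 1 + (t' : Int) = i + ((t' + 1 : Nat) : Int) := by push_cast; ring
        have e2 : j + 1 + (t' : Int) = j + ((t' + 1 : Nat) : Int) := by push_cast; ring
        rwa [e1, e2] at this
    · intro hall t' ht1 ht2
      have := hall (t' + 1) (by push_cast at ht1 ⊢; omega) (by push_cast at ht2 ⊢; omega)
      have e1 : i + ((t' + 1 : Nat) : Int) = i + 1 + (t' : Int) := by push_cast; ring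
      have e2 : j + ((t' + 1 : Nat) : Int) = j + 1 + (t' : Int) := by push_cast; ring
      rwa [e1, e2] at this
  | case3 i j h =>
    rw [fdDown, dif_neg h]
    refine iff_of_true rfl ?_
    intro t ht1 ht2
    exfalso; omega

lemma alt_iff (board : List (List Int)) (x y : Int) :
    forward_diagonal_alt board x y = true ↔
      ∀ i : Int, 0 ≤ i → i < (board.length : Int) → i ≠ x →
        0 ≤ i - (x - y) → i - (x - y) < (board.length : Int) →
        pyCell board i (i - (x - y)) = 0 := by
  unfold forward_diagonal_alt
  simp only [List.all_eq_true, PySem.List.mem_pyRange_one]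
  constructor
  · intro h i h0 h1 h2 h3 h4
    have := h i ⟨h0, h1⟩
    simp only [Bool.or_eq_true, beq_iff_eq, Bool.not_eq_true', decide_eq_false_iff_not, or_assoc] at this
    rcases this with h' | h' | h'
    · exact absurd h' h2
    · exact absurd ⟨h3, h4⟩ h'
    · exact h'
  · intro h i hi
    simp only [Bool.or_eq_true, beq_iff_eq, Bool.not_eq_true', decide_eq_false_iff_not, or_assoc]
    by_cases hx : i = x
    · exact Or.inl hx
    by_cases hr : 0 ≤ i - (x - y) ∧ i - (x - y) < (board.length : Int)
    · exact Or.inr (Or.inr (h i hi.1 hi.2 hx hr.1 hr.2))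
    · exact Or.inr (Or.inl hr)

lemma cell_congr (board : List (List Int)) {i j i' j' : Int} (hi : i = i') (hj : j = j') :
    pyCell board i j = pyCell board i' j' := by rw [hi, hj]

-- ===== VERDICT (by name: the statement is the Claim_ definition above) =====
lemma alt_false_at (board : List (List Int)) (x y i : Int)
    (h0 : 0 ≤ i) (h1 : i < (board.length : Int)) (h2 : i ≠ x)
    (h3 : 0 ≤ i - (x - y)) (h4 : i - (x - y) < (board.length : Int))
    (hnz : pyCell board i (i - (x - y)) ≠ 0) :
    forward_diagonal_alt board x y = false := by
  rcases Bool.eq_false_or_eq_true (forward_diagonal_alt board x y) with h | h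
  · exact absurd ((alt_iff board x y).mp h i h0 h1 h2 h3 h4) hnz
  · exact h

theorem forward_diagonal_spec : Claim_equal_forward_diagonal := by
  intro board x y _hdom hpre
  obtain ⟨hU, hrest⟩ := hpre
  simp only [PySem.List.mem_pyRange_one] at hU hrest
  unfold Spec_forward_diagonal
  rcases hrest with hD | hup | hdn
  · -- both loops complete: the visited cells agree with B's scan
    rw [Bool.eq_iff_iff]
    unfold forward_diagonal
    rw [alt_iff]
    constructor
    · intro h
      by_cases hu : fdUp board (x - 1) (y - 1) = true
      · rw [if_pos hu] at h
        rw [fdUp_iff] at hu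
        rw [fdDown_iff] at h
        intro i h0 h1 hne h3 h4
        rcases lt_or_gt_of_ne hne with hlt | hgt
        · have := hu (x - 1 - i).toNat (by omega) (by omega)
          calc pyCell board i (i - (x - y))
              = pyCell board (x - 1 - ((x - 1 - i).toNat : Int)) (y - 1 - ((x - 1 - i).toNat : Int)) :=
                cell_congr board (by omega) (by omega)
            _ = 0 := this
        · have := h (i - x - 1).toNat (by omega) (by omega)
          calc pyCell board i (i - (x - y))
              = pyCell board (x + 1 + ((i - x - 1).toNat : Int)) (y + 1 + ((i - x - 1).toNat : Int)) :=
                cell_congr board (by omega) (by omega)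
            _ = 0 := this
      · rw [if_neg hu] at h
        exact absurd h (by simp)
    · intro h
      have hu : fdUp board (x - 1) (y - 1) = true := by
        rw [fdUp_iff]
        intro t ht1 ht2
        have hcc : pyCell board (x - 1 - (t : Int)) (y - 1 - (t : Int))
            = pyCell board (x - 1 - t) (x - 1 - t - (x - y)) := cell_congr board rfl (by omega)
        rw [hcc]
        obtain ⟨hn, -, hz⟩ := hU (x - 1 - t) ⟨by omega, by omega⟩
        by_cases hm : x - 1 - (t : Int) - (x - y) < (board.length : Int)
        · exact h (x - 1 - t) (by omega) (by omega) (by omega) (by omega) (by omega)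
        · exact hz (by omega)
      rw [if_pos hu, fdDown_iff]
      intro t ht1 ht2
      have hcc : pyCell board (x + 1 + (t : Int)) (y + 1 + (t : Int))
          = pyCell board (x + 1 + t) (x + 1 + t - (x - y)) := cell_congr board rfl (by omega)
      rw [hcc]
      obtain ⟨-, -, -, hz⟩ := hD (x + 1 + t) ⟨by omega, by omega⟩
      by_cases hp : 0 ≤ x + 1 + (t : Int) ∧ 0 ≤ x + 1 + (t : Int) - (x - y)
      · exact h (x + 1 + t) (by omega) (by omega) (by omega) (by omega) (by omega)
      · exact hz (by omega)
  · -- a safely reached nonzero cell on the upper diagonal: both answer False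
    obtain ⟨i, hm, hjn, hnz⟩ := hup
    obtain ⟨hin, -, -⟩ := hU i hm
    have hu : fdUp board (x - 1) (y - 1) = false := by
      rcases Bool.eq_false_or_eq_true (fdUp board (x - 1) (y - 1)) with h | h
      · exfalso
        have := (fdUp_iff board (x - 1) (y - 1)).mp h (x - 1 - i).toNat (by omega) (by omega)
        exact hnz (by
          calc pyCell board i (i - (x - y))
              = pyCell board (x - 1 - ((x - 1 - i).toNat : Int)) (y - 1 - ((x - 1 - i).toNat : Int)) :=
                cell_congr board (by omega) (by omega)
            _ = 0 := this)
      · exact h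
    unfold forward_diagonal
    rw [if_neg (by simp [hu]),
        alt_false_at board x y i (by omega) hin (by omega) (by omega) hjn hnz]
  · -- a safely reached nonzero cell on the lower diagonal: both answer False
    obtain ⟨i, hm, hi0, hj0, hnz, -⟩ := hdn
    have halt : forward_diagonal_alt board x y = false :=
      alt_false_at board x y i hi0 (by omega) (by omega) hj0 (by omega) hnz
    unfold forward_diagonal
    by_cases hu : fdUp board (x - 1) (y - 1) = true
    · rw [if_pos hu, halt]
      rcases Bool.eq_false_or_eq_true (fdDown board (board.length : Int) (x + 1) (y + 1)) with h | h
      swap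
      · exact h
      · exfalso
        have := (fdDown_iff board (board.length : Int) (x + 1) (y + 1)).mp h
          (i - x - 1).toNat (by omega) (by omega)
        exact hnz (by
          calc pyCell board i (i - (x - y))
              = pyCell board (x + 1 + ((i - x - 1).toNat : Int)) (y + 1 + ((i - x - 1).toNat : Int)) :=
                cell_congr board (by omega) (by omega)
            _ = 0 := this)
    · rw [if_neg hu, halt]
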